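-- pv_equiv track=rewrite | github.com/cedney97/everybody_codes | util/main.py | transpose_grid
-- ===== SOURCE A (Python) =====
-- def transpose_grid(rows, num_times=1):
--
--     def _transpose_once(rows):
--         if not rows:
--             return []
--
--         max_len = max(len(r) for r in rows)
--         result = []
--
--         for i in range(max_len):
--             col = [r[i] for r in rows if i < len(r)]
--             result.append(col)
--
--         return result
--
--     if num_times <= 0:
--         return rows
--
--     result = rows
--     for _ in range(num_times):
--         result = _transpose_once(result)
--
--     return result
-- ===== SOURCE B (Python) =====
-- def transpose_grid(rows, num_times=1):
--     if num_times <= 0: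
--         return rows
--     result = rows
--     for _ in range(num_times):
--         cols = []
--         for r in result:
--             for j, val in enumerate(r):
--                 if j == len(cols):
--                     cols.append([val])
--                 else:
--                     cols[j].append(val)
--         result = cols
--     return result
-- ===== Notes on version B (the rewrite author's own statement) =====
-- stated objective: alternative
-- what changed: Single transpose rewritten as one row-major distributing pass (append each value to its growing column accumulator) instead of precomputing max_len and scanning all rows once per column index.
import Mathlib
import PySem

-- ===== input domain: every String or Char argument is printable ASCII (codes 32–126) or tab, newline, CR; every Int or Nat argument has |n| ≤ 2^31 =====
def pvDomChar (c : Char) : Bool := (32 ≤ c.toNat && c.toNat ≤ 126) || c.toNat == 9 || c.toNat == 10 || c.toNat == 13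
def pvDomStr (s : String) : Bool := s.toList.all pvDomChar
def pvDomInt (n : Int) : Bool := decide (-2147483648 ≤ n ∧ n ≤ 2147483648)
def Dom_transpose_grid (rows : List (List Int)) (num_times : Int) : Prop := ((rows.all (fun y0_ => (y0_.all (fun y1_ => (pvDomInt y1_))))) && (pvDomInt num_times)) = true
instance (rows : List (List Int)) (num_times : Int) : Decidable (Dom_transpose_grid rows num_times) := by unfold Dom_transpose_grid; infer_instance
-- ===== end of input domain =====

-- B replaces A's per-column scans (max_len, then one pass over all rows per column index)
-- by a single row-major distributing pass that grows the columns as accumulators; same value, similar cost.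

-- ===== PORT A =====
-- _transpose_once: guard 'if not rows', max(len(r) for r in rows) (nonempty, so Nat-fold from 0 is exact),
-- then for i in range(max_len) the comprehension [r[i] for r in rows if i < len(r)].
def pvTransposeOnce (rows : List (List Int)) : List (List Int) :=
  if rows = [] then []
  else
    let maxLen : Nat := rows.foldl (fun m r => max m r.length) 0
    (List.range maxLen).map (fun i => rows.filterMap (fun r => if h : i < r.length then some r[i] else none))

def transpose_grid (rows : List (List Int)) (num_times : Int) : List (List Int) :=
  if num_times ≤ 0 then rows
  else (PySem.List.pyRange 0 num_times 1).foldl (fun result _ => pvTransposeOnce result) rows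

-- ===== PORT B =====
-- body of 'for j, val in enumerate(r)': append a fresh column when j == len(cols), else cols[j].append(val)
-- (j comes from enumerate(r, 0), so j ≥ 0 and .toNat is exact).
def pvStep (cs : List (List Int)) (jv : Int × Int) : List (List Int) :=
  if jv.1 = (cs.length : Int) then cs ++ [[jv.2]] else cs.modify jv.1.toNat (· ++ [jv.2])

def pvDistribute (cols : List (List Int)) (r : List Int) : List (List Int) :=
  (PySem.List.enumerate r 0).foldl pvStep cols

def pvTransposeOnceAlt (rows : List (List Int)) : List (List Int) :=
  rows.foldl pvDistribute []

def transpose_grid_alt (rows : List (List Int)) (num_times : Int) : List (List Int) :=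
  if num_times ≤ 0 then rows
  else (PySem.List.pyRange 0 num_times 1).foldl (fun result _ => pvTransposeOnceAlt result) rows

-- ===== PRECONDITION & SPEC =====
def Spec_transpose_grid (rows : List (List Int)) (num_times : Int) (out : List (List Int)) : Prop := out = transpose_grid_alt rows num_times
instance (rows : List (List Int)) (num_times : Int) (out : List (List Int)) : Decidable (Spec_transpose_grid rows num_times out) := by unfold Spec_transpose_grid; infer_instance

-- ===== CLAIM (what is proved, stated in full; the proofs are below) =====
def Claim_equal_transpose_grid : Prop := ∀ (rows : List (List Int)) (num_times : Int), Dom_transpose_grid rows num_times → Spec_transpose_grid rows num_times (transpose_grid rows num_times)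

-- ===== LEMMAS AND PROOFS =====

-- proof-only canonical form of a single transpose
def pvMaxLen (p : List (List Int)) : Nat := p.foldl (fun m r => max m r.length) 0
def pvColsOf (p : List (List Int)) : List (List Int) :=
  (List.range (pvMaxLen p)).map (fun i => p.filterMap (fun r => r[i]?))

theorem pv_le_foldl_max (p : List (List Int)) (a : Nat) : a ≤ p.foldl (fun m r => max m r.length) a := by
  induction p generalizing a with
  | nil => simp
  | cons r p ih => exact le_trans (le_max_left a r.length) (ih _)

theorem pv_len_le_maxLen (p : List (List Int)) (r : List Int) (h : r ∈ p) :
    r.length ≤ pvMaxLen p := by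
  unfold pvMaxLen
  generalize 0 = a
  induction p generalizing a with
  | nil => simp at h
  | cons q p ih =>
    rcases List.mem_cons.mp h with h | h
    · subst h; exact le_trans (le_max_right a r.length) (pv_le_foldl_max _ _)
    · exact ih h _

theorem pv_col_nil (p : List (List Int)) (i : Nat) (h : pvMaxLen p ≤ i) :
    p.filterMap (fun r => r[i]?) = [] := by
  rw [List.filterMap_eq_nil_iff]
  intro r hr
  exact List.getElem?_eq_none (le_trans (pv_len_le_maxLen p r hr) h)

theorem pv_range_map_getD {α : Type} (l : List α) (d : α) :
    (List.range l.length).map (fun i => l.getD i d) = l := by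
  apply List.ext_getElem
  · simp
  · intro i h1 h2
    simp [List.getD_eq_getElem?_getD, List.getElem?_eq_getElem h2]

theorem pv_length_colsOf (p : List (List Int)) : (pvColsOf p).length = pvMaxLen p := by
  simp [pvColsOf]

theorem pv_getD_colsOf (p : List (List Int)) (i : Nat) :
    (pvColsOf p).getD i [] = p.filterMap (fun r => r[i]?) := by
  by_cases h : i < pvMaxLen p
  · simp [pvColsOf, List.getD_eq_getElem?_getD, h]
  · have h' : pvMaxLen p ≤ i := by omega
    rw [pv_col_nil p i h', List.getD_eq_getElem?_getD,
      List.getElem?_eq_none (by rw [pv_length_colsOf]; omega)]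
    rfl

theorem pv_dist_spec (vs : List Int) (cs : List (List Int)) (k : Nat) (hk : k ≤ cs.length) :
    (PySem.List.enumerate vs (k : Int)).foldl pvStep cs
      = (List.range (max cs.length (k + vs.length))).map
          (fun i => cs.getD i [] ++ (if k ≤ i then (vs[i - k]?).toList else [])) := by
  induction vs generalizing cs k with
  | nil =>
    simp only [PySem.List.enumerate_nil, List.foldl_nil, List.length_nil, Nat.add_zero,
      Nat.max_eq_left hk]
    have h1 : ∀ i : Nat, cs.getD i [] ++ (if k ≤ i then (([] : List Int)[i - k]?).toList else [])
        = cs.getD i [] := by intro i; split <;> simp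
    rw [List.map_congr_left (fun i _ => h1 i), pv_range_map_getD]
  | cons v vs ih =>
    rw [PySem.List.enumerate_cons, List.foldl_cons]
    have hcast : (k : Int) + 1 = ((k + 1 : Nat) : Int) := by push_cast; ring
    rw [hcast]
    by_cases h : k = cs.length
    case pos =>
      have e1 : pvStep cs ((k : Int), v) = cs ++ [[v]] := by
        simp only [pvStep, if_pos (by omega : ((k : Int)) = (cs.length : Int))]
      have hlen : (cs ++ [[v]]).length = cs.length + 1 := by simp
      rw [e1, ih (cs ++ [[v]]) (k + 1) (by omega)]
      have hmax : max (cs ++ [[v]]).length (k + 1 + vs.length)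
          = max cs.length (k + (v :: vs).length) := by simp; omega
      rw [hmax]
      apply List.map_congr_left
      intro i _
      by_cases hi : i < cs.length
      · rw [List.getD_eq_getElem?_getD, List.getElem?_append_left hi,
          ← List.getD_eq_getElem?_getD, if_neg (by omega : ¬ k + 1 ≤ i),
          if_neg (by omega : ¬ k ≤ i)]
      · by_cases hieq : i = cs.length
        · subst hieq
          rw [List.getD_eq_getElem?_getD, List.getElem?_append_right (le_refl _)]
          have hknat : cs.length - k = 0 := by omega
          rw [if_neg (by omega : ¬ k + 1 ≤ cs.length), if_pos (by omega : k ≤ cs.length), hknat]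
          simp [List.getD_eq_getElem?_getD, List.getElem?_eq_none (le_refl cs.length)]
        · rw [List.getD_eq_getElem?_getD, List.getElem?_eq_none (by simp; omega),
            List.getD_eq_getElem?_getD, List.getElem?_eq_none (by omega : cs.length ≤ i),
            if_pos (by omega : k + 1 ≤ i), if_pos (by omega : k ≤ i)]
          have hsub : i - k = (i - (k + 1)) + 1 := by omega
          rw [hsub]
          simp
    case neg =>
      have hlt : k < cs.length := lt_of_le_of_ne hk h
      have e1 : pvStep cs ((k : Int), v) = cs.modify k (· ++ [v]) := by
        simp only [pvStep, if_neg (by omega : ¬ ((k : Int)) = (cs.length : Int)),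
          Int.toNat_natCast]
      have hlen : (cs.modify k (· ++ [v])).length = cs.length := by simp
      rw [e1, ih (cs.modify k (· ++ [v])) (k + 1) (by omega)]
      have hmax : max (cs.modify k (· ++ [v])).length (k + 1 + vs.length)
          = max cs.length (k + (v :: vs).length) := by simp; omega
      rw [hmax]
      apply List.map_congr_left
      intro i _
      rw [List.getD_eq_getElem?_getD, List.getElem?_modify]
      by_cases hik : i = k
      · subst hik
        rw [if_neg (by omega : ¬ i + 1 ≤ i), if_pos (le_refl i)]
        simp [List.getElem?_eq_getElem hlt, List.getD_eq_getElem?_getD]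
      · simp only [if_neg (show ¬ k = i from fun hh => hik hh.symm)]
        by_cases hlt2 : i < k
        · rw [if_neg (by omega : ¬ k + 1 ≤ i), if_neg (by omega : ¬ k ≤ i)]
          cases hval : cs[i]? <;> simp [List.getD_eq_getElem?_getD, hval]
        · rw [if_pos (by omega : k + 1 ≤ i), if_pos (by omega : k ≤ i)]
          have hsub : i - k = (i - (k + 1)) + 1 := by omega
          rw [hsub]
          cases hval : cs[i]? <;> simp [List.getD_eq_getElem?_getD, hval]

theorem pv_distribute_colsOf (p : List (List Int)) (r : List Int) :
    pvDistribute (pvColsOf p) r = pvColsOf (p ++ [r]) := by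
  unfold pvDistribute
  have h0 : ((0 : Nat) : Int) = (0 : Int) := rfl
  rw [← h0, pv_dist_spec r (pvColsOf p) 0 (Nat.zero_le _)]
  have hmax : max (pvColsOf p).length (0 + r.length) = pvMaxLen (p ++ [r]) := by
    rw [pv_length_colsOf]
    simp [pvMaxLen, List.foldl_append]
  rw [hmax]
  conv_rhs => unfold pvColsOf
  apply List.map_congr_left
  intro i _
  rw [pv_getD_colsOf, if_pos (Nat.zero_le i), Nat.sub_zero, List.filterMap_append]
  cases h : r[i]? <;> simp [List.filterMap_cons, h]

theorem pv_foldl_distribute (rows p : List (List Int)) :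
    rows.foldl pvDistribute (pvColsOf p) = pvColsOf (p ++ rows) := by
  induction rows generalizing p with
  | nil => simp
  | cons r rows ih =>
    rw [List.foldl_cons, pv_distribute_colsOf, ih]
    simp

theorem pv_once_eq (rows : List (List Int)) : pvTransposeOnce rows = pvTransposeOnceAlt rows := by
  have halt : pvTransposeOnceAlt rows = pvColsOf rows := by
    have hnil : pvColsOf [] = [] := by simp [pvColsOf, pvMaxLen]
    unfold pvTransposeOnceAlt
    rw [← hnil, pv_foldl_distribute rows []]
    simp
  rw [halt]
  by_cases h : rows = []
  · subst h
    simp [pvTransposeOnce, pvColsOf, pvMaxLen]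
  · unfold pvTransposeOnce
    rw [if_neg h]
    show (List.range (rows.foldl (fun m r => max m r.length) 0)).map
        (fun i => rows.filterMap (fun r => if _ : i < r.length then some r[i] else none))
      = pvColsOf rows
    unfold pvColsOf pvMaxLen
    apply List.map_congr_left
    intro i _
    apply List.filterMap_congr
    intro r _
    by_cases hr : i < r.length
    · simp [hr, List.getElem?_eq_getElem hr]
    · simp [hr, List.getElem?_eq_none (by omega : r.length ≤ i)]

theorem transpose_grid_eq_body (rows : List (List Int)) (num_times : Int) :
    transpose_grid rows num_times = transpose_grid_alt rows num_times := by
  unfold transpose_grid transpose_grid_alt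
  have h : pvTransposeOnce = pvTransposeOnceAlt := funext pv_once_eq
  rw [h]

-- ===== VERDICT (by name: the statement is the Claim_ definition above) =====
theorem transpose_grid_spec : Claim_equal_transpose_grid := by
  intro rows num_times _
  exact transpose_grid_eq_body rows num_times
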